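-- pv_equiv track=rewrite | github.com/DragunWF/School-Work | 4th-Year/Computer_Graphics_Programming/Midterms/misc/geometric_calculator.py | translation
-- ===== SOURCE A (Python) =====
-- def translation(x: int, y: int, z: int, values: tuple[int, int, int]) -> list[int]:
--     matrix = [
--         [x, 0, 0, values[0]],
--         [0, y, 0, values[1]],
--         [0, 0, z, values[2]],
--         [0, 0, 0, 1],
--     ]
--     output = []
--     for row in matrix:
--         output.append(sum(row))
--     return output
-- ===== SOURCE B (Python) =====
-- def translation(x: int, y: int, z: int, values: tuple[int, int, int]) -> list[int]:
--     return [x + values[0], y + values[1], z + values[2], 1]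
-- ===== Notes on version B (the rewrite author's own statement) =====
-- stated objective: simpler
-- what changed: B drops the 4x4 matrix and the row-summing loop, returning the four components in closed form.
import Mathlib
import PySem

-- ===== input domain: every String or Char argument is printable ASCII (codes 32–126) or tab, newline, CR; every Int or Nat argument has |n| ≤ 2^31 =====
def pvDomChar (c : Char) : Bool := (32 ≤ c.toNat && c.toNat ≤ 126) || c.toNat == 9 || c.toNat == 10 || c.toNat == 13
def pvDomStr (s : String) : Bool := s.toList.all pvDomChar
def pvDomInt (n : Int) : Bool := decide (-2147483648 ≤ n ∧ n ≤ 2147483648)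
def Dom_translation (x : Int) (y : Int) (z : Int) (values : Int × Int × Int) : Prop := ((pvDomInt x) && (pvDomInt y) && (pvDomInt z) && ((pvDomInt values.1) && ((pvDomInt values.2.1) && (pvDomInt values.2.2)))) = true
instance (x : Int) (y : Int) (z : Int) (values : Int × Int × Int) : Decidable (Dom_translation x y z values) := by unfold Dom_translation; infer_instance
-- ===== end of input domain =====

-- B returns the four sums in closed form instead of building a 4x4 matrix and summing its rows (simpler).

-- ===== PORT A =====
def translation (x : Int) (y : Int) (z : Int) (values : Int × Int × Int) : List Int :=
  let matrix : List (List Int) :=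
    [ [x, 0, 0, values.1],
      [0, y, 0, values.2.1],
      [0, 0, z, values.2.2],
      [0, 0, 0, 1] ]
  matrix.foldl (fun output row => output ++ [row.sum]) []

-- ===== PORT B =====
def translation_alt (x : Int) (y : Int) (z : Int) (values : Int × Int × Int) : List Int :=
  [x + values.1, y + values.2.1, z + values.2.2, 1]

-- ===== PRECONDITION & SPEC =====
def Spec_translation (x : Int) (y : Int) (z : Int) (values : Int × Int × Int) (out : List Int) : Prop := out = translation_alt x y z values
instance (x : Int) (y : Int) (z : Int) (values : Int × Int × Int) (out : List Int) : Decidable (Spec_translation x y z values out) := by unfold Spec_translation; infer_instance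

-- ===== CLAIM (what is proved, stated in full; the proofs are below) =====
def Claim_equal_translation : Prop := ∀ (x : Int) (y : Int) (z : Int) (values : Int × Int × Int), Dom_translation x y z values → Spec_translation x y z values (translation x y z values)

-- ===== LEMMAS AND PROOFS =====

-- ===== VERDICT (by name: the statement is the Claim_ definition above) =====
theorem translation_spec : Claim_equal_translation := by
  intro x y z values _
  unfold Spec_translation translation translation_alt
  simp [List.foldl, List.sum]
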